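-- pv_equiv track=rewrite | github.com/n0remac/monster_stickers | monster_project/monster_app/monster_creation/sticker_generator.py | create_image_grid
-- ===== SOURCE A (Python) =====
-- def create_image_grid(rows, columns, images):
--     image_grid = []
--     for i in range(rows):
--         image_grid.append([])
--         for j in range(columns):
--             if i*columns + j < len(images):
--                 image_grid[i].append(images[i*columns + j])
--             else:
--                 image_grid[i].append(None)
--     return image_grid
-- ===== SOURCE B (Python) =====
-- def create_image_grid(rows, columns, images):
--     r, c = max(rows, 0), max(columns, 0)
--     padded = (list(images) + [None] * (r * c))[:r * c]
--     return [padded[i * c:(i + 1) * c] for i in range(r)]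
-- ===== Notes on version B (the rewrite author's own statement) =====
-- stated objective: simpler
-- what changed: Replaces the nested per-cell loop with a bounds check and index arithmetic by one padding step and slice-based chunking of a single flat list.
import Mathlib
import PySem

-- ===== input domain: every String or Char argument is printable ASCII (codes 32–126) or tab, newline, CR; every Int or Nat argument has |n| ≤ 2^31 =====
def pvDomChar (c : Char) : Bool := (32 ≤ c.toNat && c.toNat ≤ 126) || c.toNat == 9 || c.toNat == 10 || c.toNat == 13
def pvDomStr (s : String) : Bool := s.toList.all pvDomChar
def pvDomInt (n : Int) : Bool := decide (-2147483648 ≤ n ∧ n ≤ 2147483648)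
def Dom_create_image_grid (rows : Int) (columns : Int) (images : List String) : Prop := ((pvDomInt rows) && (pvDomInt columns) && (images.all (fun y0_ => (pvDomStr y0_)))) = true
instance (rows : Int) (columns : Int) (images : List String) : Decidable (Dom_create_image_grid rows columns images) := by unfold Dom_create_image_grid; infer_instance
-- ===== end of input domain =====

-- B replaces the per-cell bounds check and index arithmetic by one padding step and slice-based chunking (simpler decomposition).


-- ===== PORT A =====
-- literal transliteration: outer loop over range(rows) appending a fresh row,
-- inner loop over range(columns) appending images[i*columns+j] or None per cell
def create_image_grid (rows : Int) (columns : Int) (images : List String) : List (List (Option String)) :=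
  (PySem.List.pyRange 0 rows 1).foldl (fun grid i =>
    grid ++ [(PySem.List.pyRange 0 columns 1).foldl (fun row j =>
      row ++ [if i * columns + j < (images.length : Int) then
                PySem.List.pyGet? images (i * columns + j)
              else none]) []]) []

-- ===== PORT B =====
-- literal transliteration of Source B: pad the flat list to r*c, then chunk it by slices
def create_image_grid_alt (rows : Int) (columns : Int) (images : List String) : List (List (Option String)) :=
  let r := max rows 0
  let c := max columns 0
  let padded := PySem.List.slice (images.map some ++ List.replicate (r * c).toNat none) none (some (r * c))
  (PySem.List.pyRange 0 r 1).map (fun i => PySem.List.slice padded (some (i * c)) (some ((i + 1) * c)))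

-- ===== PRECONDITION & SPEC =====
def Spec_create_image_grid (rows : Int) (columns : Int) (images : List String) (out : List (List (Option String))) : Prop := out = create_image_grid_alt rows columns images
instance (rows : Int) (columns : Int) (images : List String) (out : List (List (Option String))) : Decidable (Spec_create_image_grid rows columns images out) := by unfold Spec_create_image_grid; infer_instance

-- ===== CLAIM (what is proved, stated in full; the proofs are below) =====
def Claim_equal_create_image_grid : Prop := ∀ (rows : Int) (columns : Int) (images : List String), Dom_create_image_grid rows columns images → Spec_create_image_grid rows columns images (create_image_grid rows columns images)

-- ===== LEMMAS AND PROOFS =====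

-- every foldl-append-singleton loop is a map
theorem pv_foldl_map {α β : Type} (f : α → β) (l : List α) (acc : List β) :
    l.foldl (fun a x => a ++ [f x]) acc = acc ++ l.map f := by
  induction l generalizing acc with
  | nil => simp
  | cons x xs ih => simp [ih]

-- the padded row-k chunk equals A's inner loop, elementwise
theorem pv_row_eq (images : List String) (rn cn k : Nat) (hk : k < rn) :
    ((((images.map some ++ List.replicate (rn * cn) (none : Option String)).take (rn * cn)).drop (k * cn)).take cn)
      = ((List.range cn).map (fun (j : Nat) => (j : Int))).map (fun j =>
          if (k : Int) * (cn : Int) + j < (images.length : Int) then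
            PySem.List.pyGet? images ((k : Int) * (cn : Int) + j)
          else none) := by
  have hle : k * cn + cn ≤ rn * cn := by
    have h1 : k + 1 ≤ rn := hk
    calc k * cn + cn = (k + 1) * cn := by ring
    _ ≤ rn * cn := Nat.mul_le_mul_right cn h1
  rw [List.map_map]
  apply List.ext_getElem
  · simp; omega
  · intro j hj1 hj2
    have hj : j < cn := by simpa using hj2
    have hidx : k * cn + j < rn * cn := by omega
    have hcast : (k : Int) * (cn : Int) + ((j : Nat) : Int) = ((k * cn + j : Nat) : Int) := by
      push_cast; ring
    rw [List.getElem_take, List.getElem_drop, List.getElem_take]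
    simp only [List.getElem_map, List.getElem_range, Function.comp_apply, hcast,
      PySem.List.pyGet?_natCast]
    by_cases h : k * cn + j < images.length
    · rw [List.getElem_append_left (by simpa using h)]
      have hcond : ((k * cn + j : Nat) : Int) < (images.length : Int) := by exact_mod_cast h
      simp [h]
      omega
    · rw [List.getElem_append_right (by simpa using h)]
      have hcond : ¬ (((k * cn + j : Nat) : Int) < (images.length : Int)) := by exact_mod_cast h
      simp [List.getElem_replicate]
      omega

-- ===== VERDICT (by name: the statement is the Claim_ definition above) =====
theorem create_image_grid_spec : Claim_equal_create_image_grid := by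
  intro rows columns images _
  unfold Spec_create_image_grid create_image_grid create_image_grid_alt
  dsimp only
  have hr : max rows 0 = ((rows.toNat : Nat) : Int) := by omega
  have hc : max columns 0 = ((columns.toNat : Nat) : Int) := by omega
  set rn := rows.toNat with hrn
  set cn := columns.toNat with hcn
  have hrows : PySem.List.pyRange 0 rows 1 = (List.range rn).map (fun (k : Nat) => (k : Int)) := by
    rw [PySem.List.pyRange_one]; simp only [sub_zero, zero_add]; rw [hrn]
  have hcols : PySem.List.pyRange 0 columns 1 = (List.range cn).map (fun (j : Nat) => (j : Int)) := by
    rw [PySem.List.pyRange_one]; simp only [sub_zero, zero_add]; rw [hcn]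
  have hrange : PySem.List.pyRange 0 ((rn : Nat) : Int) 1 = (List.range rn).map (fun (k : Nat) => (k : Int)) := by
    rw [PySem.List.pyRange_one]; simp only [sub_zero, zero_add, Int.toNat_natCast]
  have hmul : ((rn : Int)) * ((cn : Int)) = ((rn * cn : Nat) : Int) := by push_cast; ring
  rw [hrows, pv_foldl_map, List.nil_append, hr, hc, hrange, hmul, Int.toNat_natCast,
    PySem.List.slice_to_natCast]
  apply List.map_congr_left
  intro i hi
  obtain ⟨k, hk, rfl⟩ := List.mem_map.mp hi
  have hk' : k < rn := List.mem_range.mp hk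
  rw [hcols, pv_foldl_map, List.nil_append]
  have hslice : ((k : Int)) * ((cn : Int)) = ((k * cn : Nat) : Int) := by push_cast; ring
  have hslice2 : ((k : Int) + 1) * ((cn : Int)) = ((k * cn : Nat) : Int) + ((cn : Nat) : Int) := by
    push_cast; ring
  rw [hslice2, hslice, PySem.List.slice_natCast_add]
  by_cases hpos : 0 ≤ columns
  · have hcc : ((cn : Nat) : Int) = columns := by omega
    rw [← hcc]
    exact (pv_row_eq images rn cn k hk').symm
  · have h0 : cn = 0 := by omega
    simp [h0]
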